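-- pv_equiv track=rewrite | github.com/alexwday/aegis-calendar-events-refresh | stage_2_data_processing/main_data_processing.py | deduplicate_earnings_events
-- ===== SOURCE A (Python) =====
-- from collections import defaultdict
--
-- EARNINGS_PRIORITY = ["Earnings", "ConfirmedEarningsRelease", "ProjectedEarningsRelease"]
--
-- def deduplicate_earnings_events(events: list) -> list:
--     """
--     Deduplicate earnings-related events for the same institution and fiscal period.
--     Priority order determined by EARNINGS_PRIORITY constant (first = highest priority).
--     """
--     # Build priority lookup
--     priority_lookup = {et: i for i, et in enumerate(EARNINGS_PRIORITY)}
--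
--     # Group events by ticker + fiscal period
--     event_groups = defaultdict(list)
--
--     for event in events:
--         ticker = event.get("ticker", "")
--         fiscal_year = event.get("fiscal_year", "")
--         fiscal_period = event.get("fiscal_period", "")
--         event_type = event.get("event_type", "")
--
--         # Determine grouping key
--         if event_type in priority_lookup:
--             # Earnings events: group by fiscal period
--             if fiscal_year and fiscal_period:
--                 key = f"{ticker}|{fiscal_year}|{fiscal_period}"
--             else:
--                 # Fallback to date if no fiscal period
--                 event_date = event.get("event_date", "")
--                 key = f"{ticker}|date|{event_date}"
--         else:
--             # Non-earnings events: unique key (no deduplication)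
--             event_id = event.get("event_id", "")
--             key = f"unique|{event_id}"
--
--         event_groups[key].append(event)
--
--     # Deduplicate each group
--     deduplicated = []
--
--     for key, group_events in event_groups.items():
--         # Separate earnings from non-earnings
--         earnings_events = [e for e in group_events if e.get("event_type") in priority_lookup]
--         other_events = [e for e in group_events if e.get("event_type") not in priority_lookup]
--
--         if earnings_events:
--             # Sort by priority and keep highest
--             earnings_events.sort(key=lambda e: priority_lookup.get(e.get("event_type"), 999))
--             deduplicated.append(earnings_events[0])
--
--         deduplicated.extend(other_events)
--
--     return deduplicated
-- ===== SOURCE B (Python) =====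
-- EARNINGS_PRIORITY = ["Earnings", "ConfirmedEarningsRelease", "ProjectedEarningsRelease"]
--
-- def deduplicate_earnings_events(events: list) -> list:
--     """
--     Single-pass dedup: one insertion-ordered dict keyed like A's grouping keys;
--     each bucket holds (best earnings event so far, its priority, list of non-earnings
--     events). Replaces the group-then-stable-sort with a running strict argmin.
--     """
--     prio = {et: i for i, et in enumerate(EARNINGS_PRIORITY)}
--     buckets = {}  # key -> [best_event_or_None, best_priority, other_events]
--
--     for event in events:
--         et = event.get("event_type", "")
--         if et in prio:
--             ticker = event.get("ticker", "")
--             fy = event.get("fiscal_year", "")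
--             fp = event.get("fiscal_period", "")
--             if fy and fp:
--                 key = f"{ticker}|{fy}|{fp}"
--             else:
--                 key = f"{ticker}|date|{event.get('event_date', '')}"
--             p = prio[et]
--             b = buckets.get(key)
--             if b is None:
--                 buckets[key] = [event, p, []]
--             elif b[0] is None or p < b[1]:
--                 b[0] = event
--                 b[1] = p
--         else:
--             key = f"unique|{event.get('event_id', '')}"
--             b = buckets.get(key)
--             if b is None:
--                 buckets[key] = [None, 999, [event]]
--             else:
--                 b[2].append(event)
--
--     out = []
--     for best, _, others in buckets.values():
--         if best is not None:
--             out.append(best)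
--         out.extend(others)
--     return out
-- ===== Notes on version B (the rewrite author's own statement) =====
-- stated objective: alternative
-- what changed: Replaces A's group-into-lists-then-filter-and-stable-sort-per-group pipeline by a single pass that keeps, per key, only a running strict-argmin best earnings event plus the list of non-earnings events, then emits buckets in insertion order.
import Mathlib
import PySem

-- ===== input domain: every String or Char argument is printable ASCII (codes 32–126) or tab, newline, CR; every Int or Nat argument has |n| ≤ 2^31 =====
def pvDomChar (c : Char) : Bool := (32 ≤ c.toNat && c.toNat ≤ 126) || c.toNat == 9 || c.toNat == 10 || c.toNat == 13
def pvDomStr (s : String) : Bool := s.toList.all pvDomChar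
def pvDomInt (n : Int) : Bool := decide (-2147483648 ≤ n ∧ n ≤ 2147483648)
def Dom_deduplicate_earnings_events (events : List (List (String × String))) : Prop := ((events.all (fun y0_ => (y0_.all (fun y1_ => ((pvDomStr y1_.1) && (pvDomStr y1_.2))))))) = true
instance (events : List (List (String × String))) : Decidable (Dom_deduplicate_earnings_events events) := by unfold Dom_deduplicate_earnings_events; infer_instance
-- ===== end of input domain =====

-- B replaces A's group-then-filter-then-stable-sort pipeline by a single pass keeping a
-- running strict-argmin best earnings event per key (objective: alternative algorithm).

-- ===== PORT A =====

-- module constant EARNINGS_PRIORITY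
def pvEarningsPriority : List String := ["Earnings", "ConfirmedEarningsRelease", "ProjectedEarningsRelease"]

-- priority_lookup = {et: i for i, et in enumerate(EARNINGS_PRIORITY)}
def pvPriorityLookup : PySem.Dict String Int :=
  (PySem.List.enumerate pvEarningsPriority).foldl (fun d p => d.insert p.2 p.1) PySem.Dict.empty

-- event.get(k, "") on a Python dict (assoc list, first match)
def pvGet (e : List (String × String)) (k : String) : String := (PySem.Dict.mk e).getD k ""

-- body of A's first loop: the grouping key of one event
def pvKeyA (event : List (String × String)) : String :=
  let ticker := pvGet event "ticker"
  let fiscal_year := pvGet event "fiscal_year"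
  let fiscal_period := pvGet event "fiscal_period"
  let event_type := pvGet event "event_type"
  if pvPriorityLookup.contains event_type then
    if fiscal_year ≠ "" ∧ fiscal_period ≠ "" then
      ticker ++ "|" ++ fiscal_year ++ "|" ++ fiscal_period
    else
      let event_date := pvGet event "event_date"
      ticker ++ "|date|" ++ event_date
  else
    let event_id := pvGet event "event_id"
    "unique|" ++ event_id

-- event_groups[key].append(event)  (defaultdict(list))
def pvGroupStep (d : PySem.Dict String (List (List (String × String)))) (event : List (String × String)) :
    PySem.Dict String (List (List (String × String))) :=
  let key := pvKeyA event
  d.insert key (d.getD key [] ++ [event])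

-- body of A's second loop (e.get("event_type") with default None is ported with default "":
-- neither None nor "" is a key of priority_lookup, so the membership test and the
-- .get(..., 999) sort key are exact)
def pvDedupStep (acc : List (List (String × String))) (kg : String × List (List (String × String))) :
    List (List (String × String)) :=
  let earnings_events := kg.2.filter (fun e => pvPriorityLookup.contains (pvGet e "event_type"))
  let other_events := kg.2.filter (fun e => !pvPriorityLookup.contains (pvGet e "event_type"))
  let acc := if earnings_events ≠ [] then
      acc ++ [(PySem.List.sorted earnings_events (fun e => pvPriorityLookup.getD (pvGet e "event_type") 999) false).headI]
    else acc
  acc ++ other_events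

def deduplicate_earnings_events (events : List (List (String × String))) : List (List (String × String)) :=
  let event_groups := events.foldl pvGroupStep PySem.Dict.empty
  event_groups.items.foldl pvDedupStep []

-- ===== PORT B =====

-- bucket = [best_event_or_None, best_priority, other_events]
-- body of B's single loop (p = prio[et] is ported as getD et 999: it runs only under the
-- 'et in prio' guard, where both are the stored value)
def pvBStep (d : PySem.Dict String (Option (List (String × String)) × Int × List (List (String × String))))
    (event : List (String × String)) :
    PySem.Dict String (Option (List (String × String)) × Int × List (List (String × String))) :=
  let et := pvGet event "event_type"
  if pvPriorityLookup.contains et then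
    let ticker := pvGet event "ticker"
    let fy := pvGet event "fiscal_year"
    let fp := pvGet event "fiscal_period"
    let key := if fy ≠ "" ∧ fp ≠ "" then ticker ++ "|" ++ fy ++ "|" ++ fp
               else ticker ++ "|date|" ++ pvGet event "event_date"
    let p := pvPriorityLookup.getD et 999
    match d.get? key with
    | none => d.insert key (some event, p, [])
    | some b => if b.1 = none ∨ p < b.2.1 then d.insert key (some event, p, b.2.2) else d
  else
    let key := "unique|" ++ pvGet event "event_id"
    match d.get? key with
    | none => d.insert key (none, 999, [event])
    | some b => d.insert key (b.1, b.2.1, b.2.2 ++ [event])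

-- body of B's output loop
def pvEmit (acc : List (List (String × String)))
    (kb : String × (Option (List (String × String)) × Int × List (List (String × String)))) :
    List (List (String × String)) :=
  (match kb.2.1 with
   | some e => acc ++ [e]
   | none => acc) ++ kb.2.2.2

def deduplicate_earnings_events_alt (events : List (List (String × String))) : List (List (String × String)) :=
  let buckets := events.foldl pvBStep PySem.Dict.empty
  buckets.items.foldl pvEmit []

-- ===== PRECONDITION & SPEC =====
def Spec_deduplicate_earnings_events (events : List (List (String × String))) (out : List (List (String × String))) : Prop := out = deduplicate_earnings_events_alt events
instance (events : List (List (String × String))) (out : List (List (String × String))) : Decidable (Spec_deduplicate_earnings_events events out) := by unfold Spec_deduplicate_earnings_events; infer_instance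

-- ===== CLAIM (what is proved, stated in full; the proofs are below) =====
def Claim_equal_deduplicate_earnings_events : Prop := ∀ (events : List (List (String × String))), Dom_deduplicate_earnings_events events → Spec_deduplicate_earnings_events events (deduplicate_earnings_events events)

-- ===== LEMMAS AND PROOFS =====

-- abbreviations used only by the proofs
def pvIsE (e : List (String × String)) : Bool := pvPriorityLookup.contains (pvGet e "event_type")
def pvPr (e : List (String × String)) : Int := pvPriorityLookup.getD (pvGet e "event_type") 999

-- the summary of a group: what B's bucket holds for the group's key
def pvBkStep (b : Option (List (String × String)) × Int × List (List (String × String)))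
    (e : List (String × String)) :
    Option (List (String × String)) × Int × List (List (String × String)) :=
  if pvIsE e then
    (if b.1 = none ∨ pvPr e < b.2.1 then (some e, pvPr e, b.2.2) else b)
  else (b.1, b.2.1, b.2.2 ++ [e])

def pvSumm (g : List (List (String × String))) :
    Option (List (String × String)) × Int × List (List (String × String)) :=
  g.foldl pvBkStep (none, 999, [])

def pvMapF (p : String × List (List (String × String))) :
    String × (Option (List (String × String)) × Int × List (List (String × String))) :=
  (p.1, pvSumm p.2)

lemma pvSumm_append (g : List (List (String × String))) (e : List (String × String)) :
    pvSumm (g ++ [e]) = pvBkStep (pvSumm g) e := by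
  simp [pvSumm, List.foldl_append]

-- get? through an items-map with key-preserving f
lemma pvGet?_mk_map {α β : Type} (f : α → β) (l : List (String × α)) (k : String) :
    (PySem.Dict.mk (l.map (fun p => (p.1, f p.2)))).get? k = ((PySem.Dict.mk l).get? k).map f := by
  induction l with
  | nil => simp [PySem.Dict.get?]
  | cons p t ih =>
    simp only [List.map_cons]
    rw [PySem.Dict.get?_mk_cons, PySem.Dict.get?_mk_cons]
    by_cases h : p.1 == k
    · simp [h]
    · simp [h, ih]

lemma pvItems_mk {α : Type} (l : List (String × α)) : (PySem.Dict.mk l).items = l := rfl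

lemma pvDict_eq_mk_items {α : Type} (d : PySem.Dict String α) : d = PySem.Dict.mk d.items := by
  apply PySem.Dict.ext; rfl

lemma pvGet?_rel (dA : PySem.Dict String (List (List (String × String))))
    (dB : PySem.Dict String (Option (List (String × String)) × Int × List (List (String × String))))
    (h : dB.items = dA.items.map pvMapF) (k : String) :
    dB.get? k = (dA.get? k).map pvSumm := by
  rw [pvDict_eq_mk_items dB, pvDict_eq_mk_items dA, h, pvItems_mk]
  exact pvGet?_mk_map pvSumm dA.items k

lemma pvContains_rel (dA : PySem.Dict String (List (List (String × String))))
    (dB : PySem.Dict String (Option (List (String × String)) × Int × List (List (String × String))))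
    (h : dB.items = dA.items.map pvMapF) (k : String) :
    dB.contains k = dA.contains k := by
  rw [PySem.Dict.contains_eq_isSome_get?, PySem.Dict.contains_eq_isSome_get?, pvGet?_rel dA dB h]
  cases dA.get? k <;> rfl

lemma pvKeys_rel (dA : PySem.Dict String (List (List (String × String))))
    (dB : PySem.Dict String (Option (List (String × String)) × Int × List (List (String × String))))
    (h : dB.items = dA.items.map pvMapF) :
    dB.keys = dA.keys := by
  show dB.items.map (·.1) = dA.items.map (·.1)
  rw [h, List.map_map]
  rfl

-- inserting related values preserves the items relation
lemma pvInsert_rel (dA : PySem.Dict String (List (List (String × String))))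
    (dB : PySem.Dict String (Option (List (String × String)) × Int × List (List (String × String))))
    (h : dB.items = dA.items.map pvMapF) (k : String) (v : List (List (String × String))) :
    (dB.insert k (pvSumm v)).items = ((dA.insert k v).items).map pvMapF := by
  rw [PySem.Dict.items_insert, PySem.Dict.items_insert, pvContains_rel dA dB h, h]
  by_cases hc : dA.contains k = true
  · simp only [hc, if_true, List.map_map]
    apply List.map_congr_left
    intro p _
    by_cases hk : p.1 = k <;> simp [hk, pvMapF]
  · simp [hc, pvMapF]

-- a pair already holding the right value: the overwrite map is the identity
lemma pvItems_overwrite_self {α : Type} (d : PySem.Dict String α) (hnd : d.keys.Nodup)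
    (k : String) (v : α) (hv : d.get? k = some v) :
    d.items.map (fun p => if p.1 == k then (k, v) else p) = d.items := by
  have hid : d.items.map (fun p => if p.1 == k then (k, v) else p) = d.items.map id := by
    apply List.map_congr_left
    intro p hp
    obtain ⟨a, b⟩ := p
    by_cases hk : a = k
    · subst hk
      have hg : d.get? a = some b := PySem.Dict.get?_of_mem_items _ hp hnd
      rw [hv] at hg
      have : b = v := by injection hg with h'; exact h'.symm
      simp [this]
    · simp [hk]
  rw [hid, List.map_id]

lemma pvBkStep_earnings_true (b : Option (List (String × String)) × Int × List (List (String × String)))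
    (e : List (String × String)) (hiE : pvIsE e = true) (hc : b.1 = none ∨ pvPr e < b.2.1) :
    pvBkStep b e = (some e, pvPr e, b.2.2) := by
  simp [pvBkStep, hiE, hc]

lemma pvBkStep_earnings_false (b : Option (List (String × String)) × Int × List (List (String × String)))
    (e : List (String × String)) (hiE : pvIsE e = true) (hc : ¬ (b.1 = none ∨ pvPr e < b.2.1)) :
    pvBkStep b e = b := by
  simp only [pvBkStep, hiE, if_true]
  rw [if_neg hc]

lemma pvBkStep_other (b : Option (List (String × String)) × Int × List (List (String × String)))
    (e : List (String × String)) (hiE : pvIsE e = false) :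
    pvBkStep b e = (b.1, b.2.1, b.2.2 ++ [e]) := by
  simp [pvBkStep, hiE]

-- one step of the two loops preserves the relation
lemma pvStep_rel (dA : PySem.Dict String (List (List (String × String))))
    (dB : PySem.Dict String (Option (List (String × String)) × Int × List (List (String × String))))
    (hnd : dA.keys.Nodup) (h : dB.items = dA.items.map pvMapF) (e : List (String × String)) :
    (pvBStep dB e).items = ((pvGroupStep dA e).items).map pvMapF := by
  have hget := pvGet?_rel dA dB h (pvKeyA e)
  have hstepA : pvGroupStep dA e = dA.insert (pvKeyA e) (dA.getD (pvKeyA e) [] ++ [e]) := rfl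
  by_cases hiE : pvIsE e = true
  · -- earnings event
    have hkey : pvKeyA e
        = (if pvGet e "fiscal_year" ≠ "" ∧ pvGet e "fiscal_period" ≠ "" then
             pvGet e "ticker" ++ "|" ++ pvGet e "fiscal_year" ++ "|" ++ pvGet e "fiscal_period"
           else pvGet e "ticker" ++ "|date|" ++ pvGet e "event_date") := by
      simp only [pvKeyA]
      rw [if_pos (by simpa [pvIsE] using hiE)]
    have hB : pvBStep dB e
        = match dB.get? (pvKeyA e) with
          | none => dB.insert (pvKeyA e) (some e, pvPr e, [])
          | some b => if b.1 = none ∨ pvPr e < b.2.1 then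
              dB.insert (pvKeyA e) (some e, pvPr e, b.2.2) else dB := by
      simp only [pvBStep, ← hkey]
      rw [if_pos (by simpa [pvIsE] using hiE)]
      rfl
    cases hA : dA.get? (pvKeyA e) with
    | none =>
      have hBg : dB.get? (pvKeyA e) = none := by rw [hget, hA]; rfl
      have hgd : dA.getD (pvKeyA e) [] = [] := PySem.Dict.getD_of_get?_eq_none _ _ hA
      have hv : pvSumm [e] = (some e, pvPr e, []) := by
        simp [pvSumm, pvBkStep, hiE]
      rw [hB, hBg, hstepA, hgd]
      simp only [List.nil_append]
      rw [← hv]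
      exact pvInsert_rel dA dB h (pvKeyA e) [e]
    | some g =>
      have hBg : dB.get? (pvKeyA e) = some (pvSumm g) := by rw [hget, hA]; rfl
      have hgd : dA.getD (pvKeyA e) [] = g := PySem.Dict.getD_of_get?_eq_some _ _ hA
      rw [hB, hBg, hstepA, hgd]
      dsimp only
      by_cases hc : (pvSumm g).1 = none ∨ pvPr e < (pvSumm g).2.1
      · rw [if_pos hc]
        have hv : pvSumm (g ++ [e]) = (some e, pvPr e, (pvSumm g).2.2) := by
          rw [pvSumm_append, pvBkStep_earnings_true _ _ hiE hc]
        rw [← hv]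
        exact pvInsert_rel dA dB h (pvKeyA e) (g ++ [e])
      · rw [if_neg hc]
        have hv : pvSumm (g ++ [e]) = pvSumm g := by
          rw [pvSumm_append, pvBkStep_earnings_false _ _ hiE hc]
        have hins := pvInsert_rel dA dB h (pvKeyA e) (g ++ [e])
        rw [hv] at hins
        rw [← hins]
        -- inserting the value already stored changes nothing
        have hndB : dB.keys.Nodup := by rw [pvKeys_rel dA dB h]; exact hnd
        have hcB : dB.contains (pvKeyA e) = true := by
          rw [PySem.Dict.contains_eq_isSome_get?, hBg]; rfl
        rw [PySem.Dict.items_insert_of_contains _ _ hcB,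
            pvItems_overwrite_self dB hndB _ _ hBg]
  · -- non-earnings event
    have hiE' : pvIsE e = false := by simpa using hiE
    have hkey : pvKeyA e = "unique|" ++ pvGet e "event_id" := by
      simp only [pvKeyA]
      rw [if_neg (by simpa [pvIsE] using hiE')]
    have hB : pvBStep dB e
        = match dB.get? (pvKeyA e) with
          | none => dB.insert (pvKeyA e) (none, 999, [e])
          | some b => dB.insert (pvKeyA e) (b.1, b.2.1, b.2.2 ++ [e]) := by
      simp only [pvBStep, ← hkey]
      rw [if_neg (by simpa [pvIsE] using hiE')]
    cases hA : dA.get? (pvKeyA e) with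
    | none =>
      have hBg : dB.get? (pvKeyA e) = none := by rw [hget, hA]; rfl
      have hgd : dA.getD (pvKeyA e) [] = [] := PySem.Dict.getD_of_get?_eq_none _ _ hA
      have hv : pvSumm [e] = (none, 999, [e]) := by simp [pvSumm, pvBkStep, hiE']
      rw [hB, hBg, hstepA, hgd]
      simp only [List.nil_append]
      rw [← hv]
      exact pvInsert_rel dA dB h (pvKeyA e) [e]
    | some g =>
      have hBg : dB.get? (pvKeyA e) = some (pvSumm g) := by rw [hget, hA]; rfl
      have hgd : dA.getD (pvKeyA e) [] = g := PySem.Dict.getD_of_get?_eq_some _ _ hA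
      have hv : pvSumm (g ++ [e]) = ((pvSumm g).1, (pvSumm g).2.1, (pvSumm g).2.2 ++ [e]) := by
        rw [pvSumm_append, pvBkStep_other _ _ hiE']
      rw [hB, hBg, hstepA, hgd]
      dsimp only
      rw [← hv]
      exact pvInsert_rel dA dB h (pvKeyA e) (g ++ [e])

lemma pvFold_rel (l : List (List (String × String)))
    (dA : PySem.Dict String (List (List (String × String))))
    (dB : PySem.Dict String (Option (List (String × String)) × Int × List (List (String × String))))
    (hnd : dA.keys.Nodup) (h : dB.items = dA.items.map pvMapF) :
    (l.foldl pvBStep dB).items = ((l.foldl pvGroupStep dA).items).map pvMapF := by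
  induction l generalizing dA dB with
  | nil => simpa using h
  | cons e t ih =>
    simp only [List.foldl_cons]
    apply ih
    · show (dA.insert (pvKeyA e) (dA.getD (pvKeyA e) [] ++ [e])).keys.Nodup
      exact PySem.Dict.nodup_keys_insert _ _ _ hnd
    · exact pvStep_rel dA dB hnd h e

-- ===== characterisation of pvSumm and of the head of A's stable sort =====

def pvEStep (b : Option (List (String × String)) × Int) (e : List (String × String)) :
    Option (List (String × String)) × Int :=
  if b.1 = none ∨ pvPr e < b.2 then (some e, pvPr e) else b

def pvFMin (c : List (String × String)) (t : List (List (String × String))) :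
    List (String × String) :=
  t.foldl (fun b x => if pvPr x < pvPr b then x else b) c

lemma pvSumm_decomp (g : List (List (String × String))) (o : Option (List (String × String)))
    (m : Int) (os : List (List (String × String))) :
    g.foldl pvBkStep (o, m, os)
      = (((g.filter pvIsE).foldl pvEStep (o, m)).1,
         ((g.filter pvIsE).foldl pvEStep (o, m)).2,
         os ++ g.filter (fun e => !pvIsE e)) := by
  induction g generalizing o m os with
  | nil => simp
  | cons e t ih =>
    by_cases hiE : pvIsE e = true
    · simp only [List.foldl_cons, List.filter_cons, hiE, if_true]
      by_cases hc : o = none ∨ pvPr e < m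
      · rw [show pvBkStep (o, m, os) e = (some e, pvPr e, os) from pvBkStep_earnings_true _ _ hiE hc,
            show pvEStep (o, m) e = (some e, pvPr e) from by simp [pvEStep, hc]]
        simpa [hiE] using ih (some e) (pvPr e) os
      · rw [show pvBkStep (o, m, os) e = (o, m, os) from pvBkStep_earnings_false _ _ hiE hc,
            show pvEStep (o, m) e = (o, m) from by simp only [pvEStep]; rw [if_neg hc]]
        simpa [hiE] using ih o m os
    · have hiE' : pvIsE e = false := by simpa using hiE
      simp only [List.foldl_cons, List.filter_cons, hiE']
      rw [show pvBkStep (o, m, os) e = (o, m, os ++ [e]) from pvBkStep_other _ _ hiE']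
      simpa [hiE'] using ih o m (os ++ [e])

lemma pvEStep_run (t : List (List (String × String))) (c : List (String × String)) :
    t.foldl pvEStep (some c, pvPr c) = (some (pvFMin c t), pvPr (pvFMin c t)) := by
  induction t generalizing c with
  | nil => simp [pvFMin]
  | cons x s ih =>
    by_cases hlt : pvPr x < pvPr c
    · have : pvEStep (some c, pvPr c) x = (some x, pvPr x) := by simp [pvEStep, hlt]
      simp only [List.foldl_cons, this, ih x, pvFMin, List.foldl_cons, if_pos hlt]
    · have : pvEStep (some c, pvPr c) x = (some c, pvPr c) := by simp [pvEStep, hlt]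
      simp only [List.foldl_cons, this, ih c, pvFMin, List.foldl_cons, if_neg hlt]

lemma pvInsertBy_ne_nil {α : Type} (bf : α → α → Bool) (x : α) (acc : List α) :
    PySem.List.insertBy bf x acc ≠ [] := by
  have : x ∈ PySem.List.insertBy bf x acc := by
    rw [PySem.List.mem_insertBy]; exact Or.inl rfl
  exact List.ne_nil_of_mem this

lemma pvInsertBy_cons {α : Type} (bf : α → α → Bool) (x a : α) (as : List α) :
    PySem.List.insertBy bf x (a :: as)
      = if bf x a then x :: a :: as else a :: PySem.List.insertBy bf x as := by
  simp [PySem.List.insertBy]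

lemma pvHeadI_foldl_insertBy {α : Type} [Inhabited α] (bf : α → α → Bool)
    (t : List α) (acc : List α) (hne : acc ≠ []) :
    (t.foldl (fun acc x => PySem.List.insertBy bf x acc) acc) ≠ [] ∧
    (t.foldl (fun acc x => PySem.List.insertBy bf x acc) acc).headI
      = t.foldl (fun b x => if bf x b then x else b) acc.headI := by
  induction t generalizing acc with
  | nil => exact ⟨hne, rfl⟩
  | cons x s ih =>
    obtain ⟨a, as, rfl⟩ := List.exists_cons_of_ne_nil hne
    have hstep : PySem.List.insertBy bf x (a :: as)
        = if bf x a then x :: a :: as else a :: PySem.List.insertBy bf x as :=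
      pvInsertBy_cons bf x a as
    have hne' : PySem.List.insertBy bf x (a :: as) ≠ [] := pvInsertBy_ne_nil bf x (a :: as)
    have hhead : (PySem.List.insertBy bf x (a :: as)).headI = if bf x a then x else a := by
      rw [hstep]
      by_cases hb : bf x a <;> simp [hb]
    have := ih (PySem.List.insertBy bf x (a :: as)) hne'
    refine ⟨this.1, ?_⟩
    simp only [List.foldl_cons]
    rw [this.2, hhead]
    rfl

lemma pvSorted_headI (h : List (String × String)) (t : List (List (String × String))) :
    (PySem.List.sorted (h :: t) pvPr false).headI = pvFMin h t := by
  rw [PySem.List.sorted_eq_foldl_insertBy]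
  simp only [List.foldl_cons]
  have h1 : PySem.List.insertBy (fun a b => decide (pvPr a < pvPr b)) h ([] : List (List (String × String))) = [h] := by
    simp [PySem.List.insertBy]
  rw [h1]
  have := pvHeadI_foldl_insertBy (fun a b => decide (pvPr a < pvPr b)) t [h] (by simp)
  rw [this.2]
  simp only [List.headI]
  unfold pvFMin
  apply PySem.List.foldl_congr_mem
  intro b x _
  by_cases hlt : pvPr x < pvPr b <;> simp [hlt]

-- per-group: B's bucket emits exactly what A's dedup step emits
lemma pvEmit_mapF (acc : List (List (String × String))) (p : String × List (List (String × String))) :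
    pvEmit acc (pvMapF p) = pvDedupStep acc p := by
  have hsumm : pvSumm p.2
      = (((p.2.filter pvIsE).foldl pvEStep (none, 999)).1,
         ((p.2.filter pvIsE).foldl pvEStep (none, 999)).2,
         p.2.filter (fun e => !pvIsE e)) := by
    rw [pvSumm]
    simpa using pvSumm_decomp p.2 none 999 []
  cases hE : p.2.filter pvIsE with
  | nil =>
    rw [hE] at hsumm
    simp only [List.foldl_nil] at hsumm
    simp only [pvEmit, pvMapF, hsumm, pvDedupStep]
    rw [if_neg (by simp [show (fun e => pvPriorityLookup.contains (pvGet e "event_type")) = pvIsE from rfl, hE])]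
    rfl
  | cons hd tl =>
    rw [hE] at hsumm
    have hfirst : pvEStep (none, 999) hd = (some hd, pvPr hd) := by simp [pvEStep]
    rw [List.foldl_cons, hfirst, pvEStep_run tl hd] at hsumm
    simp only [pvEmit, pvMapF, hsumm, pvDedupStep]
    rw [if_pos (by simp [show (fun e => pvPriorityLookup.contains (pvGet e "event_type")) = pvIsE from rfl, hE])]
    have hkey : (fun e => pvPriorityLookup.getD (pvGet e "event_type") 999) = pvPr := rfl
    rw [show (fun e => pvPriorityLookup.contains (pvGet e "event_type")) = pvIsE from rfl, hE, hkey,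
        pvSorted_headI hd tl]
    rfl

-- ===== VERDICT (by name: the statement is the Claim_ definition above) =====
theorem deduplicate_earnings_events_spec : Claim_equal_deduplicate_earnings_events := by
  intro events _
  show deduplicate_earnings_events events = deduplicate_earnings_events_alt events
  show (events.foldl pvGroupStep PySem.Dict.empty).items.foldl pvDedupStep []
      = (events.foldl pvBStep PySem.Dict.empty).items.foldl pvEmit []
  have hrel := pvFold_rel events PySem.Dict.empty PySem.Dict.empty (by simp) (by rfl)
  rw [hrel, List.foldl_map]
  symm
  apply PySem.List.foldl_congr_mem
  intro acc p _
  exact pvEmit_mapF acc p
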